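-- pv_equiv track=rewrite | github.com/landry237-create/Matching_CV | src/analyse/extracteur_formation.py | _calculer_score_prestige
-- ===== SOURCE A (Python) =====
-- from typing import Optional, Any, Dict, List, Set
--
-- def _calculer_score_prestige(ecoles: List[str]) -> int:
--     """
--     Calcule un score de prestige basé sur les écoles.
--
--     Args:
--         ecoles: Liste des écoles fréquentées
--
--     Returns:
--         Score 0-100
--     """
--     if not ecoles:
--         return 50  # Score neutre
--
--     texte_ecoles = ' '.join(ecoles).lower()
--
--     # Écoles ultra-prestigieuses (score 100)
--     ultra_prestige = ['polytechnique', 'x', 'hec', 'ena', 'mit', 'stanford', 'harvard']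
--     if any(ecole in texte_ecoles for ecole in ultra_prestige):
--         return 100
--
--     # Grandes écoles (score 90)
--     grandes_ecoles = ['centrale', 'mines', 'ponts', 'essec', 'escp', 'sciences po']
--     if any(ecole in texte_ecoles for ecole in grandes_ecoles):
--         return 90
--
--     # Bonnes écoles (score 75)
--     bonnes_ecoles = ['telecom', 'supelec', 'em lyon', 'edhec', 'insa']
--     if any(ecole in texte_ecoles for ecole in bonnes_ecoles):
--         return 75
--
--     # École mentionnée mais pas dans top (score 60)
--     return 60
-- ===== SOURCE B (Python) =====
-- _PRESTIGE = {
--     'polytechnique': 100, 'x': 100, 'hec': 100, 'ena': 100, 'mit': 100,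
--     'stanford': 100, 'harvard': 100,
--     'centrale': 90, 'mines': 90, 'ponts': 90, 'essec': 90, 'escp': 90,
--     'sciences po': 90,
--     'telecom': 75, 'supelec': 75, 'em lyon': 75, 'edhec': 75, 'insa': 75,
-- }
--
-- def _calculer_score_prestige(ecoles):
--     if not ecoles:
--         return 50
--     texte = ' '.join(ecoles).lower()
--     scores = [s for mot, s in _PRESTIGE.items() if mot in texte]
--     return max(scores) if scores else 60
-- ===== Notes on version B (the rewrite author's own statement) =====
-- stated objective: simpler
-- what changed: Replaces the three-tier short-circuiting if-cascade by one flat keyword-to-score table and a single max-reduction over the matching keywords (default 60), correct because higher tier means higher score.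
import Mathlib
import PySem

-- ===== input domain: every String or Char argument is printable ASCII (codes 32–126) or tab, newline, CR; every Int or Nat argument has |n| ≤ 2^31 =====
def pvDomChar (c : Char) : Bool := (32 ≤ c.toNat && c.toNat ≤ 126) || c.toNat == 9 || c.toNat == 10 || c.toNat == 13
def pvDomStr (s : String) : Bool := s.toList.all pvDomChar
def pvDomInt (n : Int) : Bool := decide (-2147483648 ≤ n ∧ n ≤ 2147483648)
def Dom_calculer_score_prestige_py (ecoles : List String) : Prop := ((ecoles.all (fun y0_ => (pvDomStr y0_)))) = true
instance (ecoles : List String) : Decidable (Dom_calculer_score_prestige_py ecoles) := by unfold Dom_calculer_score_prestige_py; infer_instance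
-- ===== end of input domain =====

-- B replaces A's three-tier short-circuiting cascade by one flat keyword→score table and a
-- single max-reduction over the matching keywords (objective: simpler).

-- ===== PORT A =====
def calculer_score_prestige_py (ecoles : List String) : Int :=
  if ecoles = [] then 50
  else
    let texte := PySem.Str.lower (PySem.Str.join " " ecoles)
    if (["polytechnique", "x", "hec", "ena", "mit", "stanford", "harvard"].any
        (fun e => PySem.Str.isIn e texte)) then 100
    else if (["centrale", "mines", "ponts", "essec", "escp", "sciences po"].any
        (fun e => PySem.Str.isIn e texte)) then 90
    else if (["telecom", "supelec", "em lyon", "edhec", "insa"].any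
        (fun e => PySem.Str.isIn e texte)) then 75
    else 60

-- ===== PORT B =====
-- the flat keyword → score table (Source B's _PRESTIGE dict, insertion order)
def pvPrestigeTable : List (String × Int) :=
  [("polytechnique", 100), ("x", 100), ("hec", 100), ("ena", 100), ("mit", 100),
   ("stanford", 100), ("harvard", 100),
   ("centrale", 90), ("mines", 90), ("ponts", 90), ("essec", 90), ("escp", 90),
   ("sciences po", 90),
   ("telecom", 75), ("supelec", 75), ("em lyon", 75), ("edhec", 75), ("insa", 75)]

def calculer_score_prestige_py_alt (ecoles : List String) : Int :=
  if ecoles = [] then 50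
  else
    let texte := PySem.Str.lower (PySem.Str.join " " ecoles)
    let scores := (pvPrestigeTable.filter (fun p => PySem.Str.isIn p.1 texte)).map Prod.snd
    match scores with
    | [] => 60
    | h :: t => t.foldl max h

-- ===== PRECONDITION & SPEC =====
def Spec_calculer_score_prestige_py (ecoles : List String) (out : Int) : Prop := out = calculer_score_prestige_py_alt ecoles
instance (ecoles : List String) (out : Int) : Decidable (Spec_calculer_score_prestige_py ecoles out) := by unfold Spec_calculer_score_prestige_py; infer_instance

-- ===== CLAIM (what is proved, stated in full; the proofs are below) =====
def Claim_equal_calculer_score_prestige_py : Prop := ∀ (ecoles : List String), Dom_calculer_score_prestige_py ecoles → Spec_calculer_score_prestige_py ecoles (calculer_score_prestige_py ecoles)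

-- ===== LEMMAS AND PROOFS =====

-- a fold of max over elements all ≤ the accumulator returns the accumulator
lemma pv_foldl_max_eq_self (t : List Int) (a : Int) (h : ∀ y ∈ t, y ≤ a) :
    t.foldl max a = a := by
  rcases PySem.List.foldl_max_mem t a with h1 | h1
  · exact h1
  · exact le_antisymm (h _ h1) (PySem.List.le_foldl_max t a).1

-- filtering a constant-score group then projecting the score is a replicate
lemma pv_pairs_filter_map (ks : List String) (v : Int) (c : String → Bool) :
    ((ks.map (fun k => (k, v))).filter (fun p => c p.1)).map Prod.snd
      = List.replicate (ks.filter c).length v := by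
  induction ks with
  | nil => rfl
  | cons k ks ih =>
    by_cases hk : c k = true <;>
      simp [hk, ih, List.replicate_succ]

lemma pv_any_iff_filter_ne_nil (l : List String) (p : String → Bool) :
    l.any p = true ↔ l.filter p ≠ [] := by
  rw [List.any_eq_true, Ne, List.filter_eq_nil_iff]
  push Not
  simp

-- the master lemma: B's max-reduction over the flat table equals A's tier cascade,
-- for any containment predicate c
lemma pv_master (c : String → Bool) :
    (match ((pvPrestigeTable.filter (fun p => c p.1)).map Prod.snd) with
      | [] => (60 : Int)
      | h :: t => t.foldl max h)
    = (if (["polytechnique", "x", "hec", "ena", "mit", "stanford", "harvard"].any c) then 100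
       else if (["centrale", "mines", "ponts", "essec", "escp", "sciences po"].any c) then 90
       else if (["telecom", "supelec", "em lyon", "edhec", "insa"].any c) then 75
       else 60) := by
  have htab : pvPrestigeTable =
      (["polytechnique", "x", "hec", "ena", "mit", "stanford", "harvard"].map (fun k => (k, (100 : Int))))
      ++ (["centrale", "mines", "ponts", "essec", "escp", "sciences po"].map (fun k => (k, (90 : Int))))
      ++ (["telecom", "supelec", "em lyon", "edhec", "insa"].map (fun k => (k, (75 : Int)))) := rfl
  rw [htab, List.filter_append, List.filter_append, List.map_append, List.map_append,
      pv_pairs_filter_map, pv_pairs_filter_map, pv_pairs_filter_map]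
  set g1 := ["polytechnique", "x", "hec", "ena", "mit", "stanford", "harvard"] with hg1
  set g2 := ["centrale", "mines", "ponts", "essec", "escp", "sciences po"] with hg2
  set g3 := ["telecom", "supelec", "em lyon", "edhec", "insa"] with hg3
  by_cases h1 : g1.any c = true
  · obtain ⟨m, hm⟩ := Nat.exists_eq_succ_of_ne_zero
      (show (g1.filter c).length ≠ 0 by simpa using (pv_any_iff_filter_ne_nil g1 c).mp h1)
    rw [hm]
    simp only [h1, if_true, List.replicate_succ, List.cons_append]
    apply pv_foldl_max_eq_self
    intro y hy
    rcases List.mem_append.mp hy with hy | hy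
    · rcases List.mem_append.mp hy with hy | hy <;>
        simp [List.eq_of_mem_replicate hy]
    · simp [List.eq_of_mem_replicate hy]
  · have e1 : (g1.filter c).length = 0 := by
      simpa using not_not.mp (fun h => h1 ((pv_any_iff_filter_ne_nil g1 c).mpr h))
    simp only [Bool.not_eq_true] at h1
    rw [e1]
    simp only [h1, List.replicate_zero, List.nil_append, Bool.false_eq_true, if_false]
    by_cases h2 : g2.any c = true
    · obtain ⟨m, hm⟩ := Nat.exists_eq_succ_of_ne_zero
        (show (g2.filter c).length ≠ 0 by simpa using (pv_any_iff_filter_ne_nil g2 c).mp h2)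
      rw [hm]
      simp only [h2, if_true, List.replicate_succ, List.cons_append]
      apply pv_foldl_max_eq_self
      intro y hy
      rcases List.mem_append.mp hy with hy | hy <;>
        simp [List.eq_of_mem_replicate hy]
    · have e2 : (g2.filter c).length = 0 := by
        simpa using not_not.mp (fun h => h2 ((pv_any_iff_filter_ne_nil g2 c).mpr h))
      simp only [Bool.not_eq_true] at h2
      rw [e2]
      simp only [h2, List.replicate_zero, List.nil_append, Bool.false_eq_true, if_false]
      by_cases h3 : g3.any c = true
      · obtain ⟨m, hm⟩ := Nat.exists_eq_succ_of_ne_zero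
          (show (g3.filter c).length ≠ 0 by simpa using (pv_any_iff_filter_ne_nil g3 c).mp h3)
        rw [hm]
        simp only [h3, if_true, List.replicate_succ]
        apply pv_foldl_max_eq_self
        intro y hy
        simp [List.eq_of_mem_replicate hy]
      · have e3 : (g3.filter c).length = 0 := by
          simpa using not_not.mp (fun h => h3 ((pv_any_iff_filter_ne_nil g3 c).mpr h))
        simp only [Bool.not_eq_true] at h3
        rw [e3]
        simp [h3]

-- ===== VERDICT (by name: the statement is the Claim_ definition above) =====
theorem calculer_score_prestige_py_spec : Claim_equal_calculer_score_prestige_py := by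
  intro ecoles _
  unfold Spec_calculer_score_prestige_py calculer_score_prestige_py calculer_score_prestige_py_alt
  by_cases he : ecoles = []
  · simp [he]
  · simp only [he, if_false]
    exact (pv_master (fun e => PySem.Str.isIn e (PySem.Str.lower (PySem.Str.join " " ecoles)))).symm
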